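-- pv_equiv track=rewrite | github.com/hregahego/imagebraile | brailleConvertButNotSpaghettiLIBRARY.py | generateContour
-- ===== SOURCE A (Python) =====
-- charMap = {'      ': ' ', '.     ': '⠁', '  .   ': '⠂', '. .   ': '⠃', '    . ': '⠄', '.   . ': '⠅', '  . . ': '⠆', '. . . ': '⠇', ' .    ': '⠈', '..    ': '⠉', ' ..   ': '⠊', '...   ': '⠋', ' .  . ': '⠌', '..  . ': '⠍', ' .. . ': '⠎', '... . ': '⠏', '   .  ': '⠐', '.  .  ': '⠑', '  ..  ': '⠒', '. ..  ': '⠓', '   .. ': '⠔', '.  .. ': '⠕', '  ... ': '⠖', '. ... ': '⠗', ' . .  ': '⠘', '.. .  ': '⠙', ' ...  ': '⠚', '....  ': '⠛', ' . .. ': '⠜', '.. .. ': '⠝', ' .... ': '⠞', '..... ': '⠟', '     .': '⠠', '.    .': '⠡', '  .  .': '⠢', '. .  .': '⠣', '    ..': '⠤', '.   ..': '⠥', '  . ..': '⠦', '. . ..': '⠧', ' .   .': '⠨', '..   .': '⠩', ' ..  .': '⠪', '...  .': '⠫', ' .  ..': '⠬', '..  ..': '⠭', ' .. ..': '⠮',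 '... ..': '⠯', '   . .': '⠰', '.  . .': '⠱', '  .. .': '⠲', '. .. .': '⠳', '   ...': '⠴', '.  ...': '⠵', '  ....': '⠶', '. ....': '⠷', ' . . .': '⠸', '.. . .': '⠹', ' ... .': '⠺', '.... .': '⠻', ' . ...': '⠼', '.. ...': '⠽', ' .....': '⠾', '......': '⠿'}
--
-- def matchChar(pixels):
--     string = ""
--     for i in pixels:
--         if i > 0:
--             string += ' '
--         else:
--             string += '.'
--     return charMap.get(string)
--
-- def generateContour(coords, xCount, yCount):
--     lines = []
--     for i in range(yCount):
--         line = ''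
--         for j in range(xCount):
--             x = j * 2
--             # xMax = (j+1) * xCount
--             y = i * 3
--             # yMax = (i+1) * yCount
--             input = [coords.get((x, y)), coords.get((x+1, y)), coords.get((x, y+1)),
--                      coords.get((x+1, y+1)), coords.get((x, y+2)), coords.get((x+1, y+2))]
--
--             line += matchChar(input)
--         line += '\n'
--         lines.append(line)
--     return lines
-- ===== SOURCE B (Python) =====
-- def generateContour(coords, xCount, yCount):
--     # Inverted (scatter) algorithm: instead of six dict lookups per grid cell,
--     # make ONE pass over the coordinate dict, accumulating each dot pixel's
--     # braille bit into the cell it falls in, then render the rows.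
--     cells = {}
--     for (x, y), v in coords.items():
--         if v <= 0:
--             cx, cy = x // 2, y // 3
--             if 0 <= cx < xCount and 0 <= cy < yCount:
--                 cells[(cx, cy)] = cells.get((cx, cy), 0) + (1 << ((y - 3 * cy) + 3 * (x - 2 * cx)))
--     return [''.join(' ' if n == 0 else chr(0x2800 + n)
--                     for n in (cells.get((j, i), 0) for j in range(xCount))) + '\n'
--             for i in range(yCount)]
-- ===== Notes on version B (the rewrite author's own statement) =====
-- stated objective: alternative
-- what changed: B inverts the traversal: instead of A's per-cell probing (six dict lookups and a 64-entry string-table lookup for each of the xCount*yCount cells), B makes one scatter pass over the coordinate dict, adding each dot pixel's braille bit into an accumulator dict keyed by its cell (x//2, y//3), then renders the rows from the accumulated codepoints.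
import Mathlib
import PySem

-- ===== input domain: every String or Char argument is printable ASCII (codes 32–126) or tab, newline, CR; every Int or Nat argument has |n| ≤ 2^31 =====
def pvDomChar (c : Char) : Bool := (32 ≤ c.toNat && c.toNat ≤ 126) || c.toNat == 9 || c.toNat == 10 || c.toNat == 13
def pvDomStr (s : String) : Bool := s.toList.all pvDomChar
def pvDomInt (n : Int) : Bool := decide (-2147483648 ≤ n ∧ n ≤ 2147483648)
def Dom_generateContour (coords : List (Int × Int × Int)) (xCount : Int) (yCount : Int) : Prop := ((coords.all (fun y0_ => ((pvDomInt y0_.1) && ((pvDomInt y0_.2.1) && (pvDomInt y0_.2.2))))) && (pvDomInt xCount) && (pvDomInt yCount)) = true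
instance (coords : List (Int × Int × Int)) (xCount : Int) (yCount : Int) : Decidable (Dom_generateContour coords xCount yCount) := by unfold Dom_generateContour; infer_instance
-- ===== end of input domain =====

-- B inverts the traversal: one scatter pass over the coordinate dict accumulating braille bits per
-- cell, instead of A's six dict lookups + 64-entry string-table lookup per cell (objective:
-- alternative); return values proved equal on Pre_ (where A returns; on a missing pixel coordinate
-- of a rendered cell A raises TypeError, which is outside Pre_).

-- shared decoding of the dict parameter (Python's `coords` IS a dict; the list is its items)
def pvToDict (coords : List (Int × Int × Int)) : PySem.Dict (Int × Int) Int :=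
  PySem.Dict.ofList (coords.map (fun e => ((e.1, e.2.1), e.2.2)))

-- ===== PORT A =====
def charMapA : PySem.Dict (List Char) (List Char) :=
  PySem.Dict.ofList [([' ', ' ', ' ', ' ', ' ', ' '], [' ']),
    (['.', ' ', ' ', ' ', ' ', ' '], ['⠁']),
    ([' ', ' ', '.', ' ', ' ', ' '], ['⠂']),
    (['.', ' ', '.', ' ', ' ', ' '], ['⠃']),
    ([' ', ' ', ' ', ' ', '.', ' '], ['⠄']),
    (['.', ' ', ' ', ' ', '.', ' '], ['⠅']),
    ([' ', ' ', '.', ' ', '.', ' '], ['⠆']),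
    (['.', ' ', '.', ' ', '.', ' '], ['⠇']),
    ([' ', '.', ' ', ' ', ' ', ' '], ['⠈']),
    (['.', '.', ' ', ' ', ' ', ' '], ['⠉']),
    ([' ', '.', '.', ' ', ' ', ' '], ['⠊']),
    (['.', '.', '.', ' ', ' ', ' '], ['⠋']),
    ([' ', '.', ' ', ' ', '.', ' '], ['⠌']),
    (['.', '.', ' ', ' ', '.', ' '], ['⠍']),
    ([' ', '.', '.', ' ', '.', ' '], ['⠎']),
    (['.', '.', '.', ' ', '.', ' '], ['⠏']),
    ([' ', ' ', ' ', '.', ' ', ' '], ['⠐']),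
    (['.', ' ', ' ', '.', ' ', ' '], ['⠑']),
    ([' ', ' ', '.', '.', ' ', ' '], ['⠒']),
    (['.', ' ', '.', '.', ' ', ' '], ['⠓']),
    ([' ', ' ', ' ', '.', '.', ' '], ['⠔']),
    (['.', ' ', ' ', '.', '.', ' '], ['⠕']),
    ([' ', ' ', '.', '.', '.', ' '], ['⠖']),
    (['.', ' ', '.', '.', '.', ' '], ['⠗']),
    ([' ', '.', ' ', '.', ' ', ' '], ['⠘']),
    (['.', '.', ' ', '.', ' ', ' '], ['⠙']),
    ([' ', '.', '.', '.', ' ', ' '], ['⠚']),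
    (['.', '.', '.', '.', ' ', ' '], ['⠛']),
    ([' ', '.', ' ', '.', '.', ' '], ['⠜']),
    (['.', '.', ' ', '.', '.', ' '], ['⠝']),
    ([' ', '.', '.', '.', '.', ' '], ['⠞']),
    (['.', '.', '.', '.', '.', ' '], ['⠟']),
    ([' ', ' ', ' ', ' ', ' ', '.'], ['⠠']),
    (['.', ' ', ' ', ' ', ' ', '.'], ['⠡']),
    ([' ', ' ', '.', ' ', ' ', '.'], ['⠢']),
    (['.', ' ', '.', ' ', ' ', '.'], ['⠣']),
    ([' ', ' ', ' ', ' ', '.', '.'], ['⠤']),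
    (['.', ' ', ' ', ' ', '.', '.'], ['⠥']),
    ([' ', ' ', '.', ' ', '.', '.'], ['⠦']),
    (['.', ' ', '.', ' ', '.', '.'], ['⠧']),
    ([' ', '.', ' ', ' ', ' ', '.'], ['⠨']),
    (['.', '.', ' ', ' ', ' ', '.'], ['⠩']),
    ([' ', '.', '.', ' ', ' ', '.'], ['⠪']),
    (['.', '.', '.', ' ', ' ', '.'], ['⠫']),
    ([' ', '.', ' ', ' ', '.', '.'], ['⠬']),
    (['.', '.', ' ', ' ', '.', '.'], ['⠭']),
    ([' ', '.', '.', ' ', '.', '.'], ['⠮']),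
    (['.', '.', '.', ' ', '.', '.'], ['⠯']),
    ([' ', ' ', ' ', '.', ' ', '.'], ['⠰']),
    (['.', ' ', ' ', '.', ' ', '.'], ['⠱']),
    ([' ', ' ', '.', '.', ' ', '.'], ['⠲']),
    (['.', ' ', '.', '.', ' ', '.'], ['⠳']),
    ([' ', ' ', ' ', '.', '.', '.'], ['⠴']),
    (['.', ' ', ' ', '.', '.', '.'], ['⠵']),
    ([' ', ' ', '.', '.', '.', '.'], ['⠶']),
    (['.', ' ', '.', '.', '.', '.'], ['⠷']),
    ([' ', '.', ' ', '.', ' ', '.'], ['⠸']),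
    (['.', '.', ' ', '.', ' ', '.'], ['⠹']),
    ([' ', '.', '.', '.', ' ', '.'], ['⠺']),
    (['.', '.', '.', '.', ' ', '.'], ['⠻']),
    ([' ', '.', ' ', '.', '.', '.'], ['⠼']),
    (['.', '.', ' ', '.', '.', '.'], ['⠽']),
    ([' ', '.', '.', '.', '.', '.'], ['⠾']),
    (['.', '.', '.', '.', '.', '.'], ['⠿'])]

-- matchChar: the `for i in pixels` loop raises TypeError on a None pixel — modelled by the Option
-- state; charMap.get(string) is the final dict lookup (None is never hit on six-pixel input).
def matchCharA (pixels : List (Option Int)) : Option (List Char) :=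
  (pixels.foldl (fun st i => st.bind (fun s => i.map (fun v => s ++ (if v > 0 then [' '] else ['.'])))) (some [])).bind
    (fun s => charMapA.get? s)

def generateContour (coords : List (Int × Int × Int)) (xCount : Int) (yCount : Int) : List String :=
  let d := pvToDict coords
  (PySem.List.pyRange 0 yCount 1).foldl (fun lines i =>
    let line := (PySem.List.pyRange 0 xCount 1).foldl (fun line j =>
      let x := j * 2
      let y := i * 3
      let input := [d.get? (x, y), d.get? (x + 1, y), d.get? (x, y + 1),
                    d.get? (x + 1, y + 1), d.get? (x, y + 2), d.get? (x + 1, y + 2)]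
      -- `line += matchChar(input)`: under Pre_ the lookup is always `some`; `.getD []` is never taken
      line ++ (matchCharA input).getD []) ([] : List Char)
    lines ++ [String.ofList (line ++ ['\n'])]) []

-- ===== PORT B =====
-- loop body of Source B's scatter pass (cx, cy inlined); Python's `1 << k` is ported as `2 ^ k`
-- (exact: inside the guard the shift amount (y - 3*cy) + 3*(x - 2*cx) is provably in [0, 5])
def stepB (xCount yCount : Int) (c : PySem.Dict (Int × Int) Int) (p : (Int × Int) × Int) :
    PySem.Dict (Int × Int) Int :=
  if p.2 ≤ 0 then
    if 0 ≤ PySem.Int.floordiv p.1.1 2 ∧ PySem.Int.floordiv p.1.1 2 < xCount ∧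
        0 ≤ PySem.Int.floordiv p.1.2 3 ∧ PySem.Int.floordiv p.1.2 3 < yCount then
      c.insert (PySem.Int.floordiv p.1.1 2, PySem.Int.floordiv p.1.2 3)
        (c.getD (PySem.Int.floordiv p.1.1 2, PySem.Int.floordiv p.1.2 3) 0
          + 2 ^ ((p.1.2 - 3 * PySem.Int.floordiv p.1.2 3) + 3 * (p.1.1 - 2 * PySem.Int.floordiv p.1.1 2)).toNat)
    else c
  else c

def generateContour_alt (coords : List (Int × Int × Int)) (xCount : Int) (yCount : Int) : List String :=
  let cells := (pvToDict coords).items.foldl (stepB xCount yCount) PySem.Dict.empty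
  (PySem.List.pyRange 0 yCount 1).map (fun i =>
    String.ofList (((PySem.List.pyRange 0 xCount 1).map (fun j =>
      let n := cells.getD (j, i) 0
      if n = 0 then ' ' else Char.ofNat (0x2800 + n).toNat)) ++ ['\n']))

-- ===== PRECONDITION & SPEC =====
-- Pre_ excludes exactly the inputs where A raises TypeError: some pixel coordinate of a rendered
-- cell is missing from coords, so coords.get returns None and `None > 0` fails.  The two leading
-- tests are equivalent short-cuts (no cells → nothing required; fewer entries than the 6·xCount·yCount
-- required distinct keys → some key is missing), so the quantifier is only decided on feasible sizes.
def preCellsB (coords : List (Int × Int × Int)) (xCount : Int) (yCount : Int) : Bool :=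
  if 0 < xCount ∧ 0 < yCount then
    if PySem.List.len coords < 6 * xCount * yCount then false
    else (PySem.List.pyRange 0 yCount 1).all (fun i => (PySem.List.pyRange 0 xCount 1).all (fun j =>
      ([(j * 2, i * 3), (j * 2 + 1, i * 3), (j * 2, i * 3 + 1), (j * 2 + 1, i * 3 + 1),
        (j * 2, i * 3 + 2), (j * 2 + 1, i * 3 + 2)] : List (Int × Int)).all (fun k =>
        coords.any (fun e => decide (e.1 = k.1) && decide (e.2.1 = k.2)))))
  else true

def Pre_generateContour (coords : List (Int × Int × Int)) (xCount : Int) (yCount : Int) : Prop :=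
  preCellsB coords xCount yCount = true
instance (coords : List (Int × Int × Int)) (xCount : Int) (yCount : Int) : Decidable (Pre_generateContour coords xCount yCount) := by unfold Pre_generateContour; infer_instance

def pvWitness_generateContour : (List (Int × Int × Int)) × Int × Int :=
  ([(0, 0, 1), (1, 0, 0), (0, 1, 5), (1, 1, -2), (0, 2, 3), (1, 2, 0)], 1, 1)

def Spec_generateContour (coords : List (Int × Int × Int)) (xCount : Int) (yCount : Int) (out : List String) : Prop := out = generateContour_alt coords xCount yCount
instance (coords : List (Int × Int × Int)) (xCount : Int) (yCount : Int) (out : List String) : Decidable (Spec_generateContour coords xCount yCount out) := by unfold Spec_generateContour; infer_instance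

-- ===== CLAIM (what is proved, stated in full; the proofs are below) =====
def Claim_equal_generateContour : Prop := ∀ (coords : List (Int × Int × Int)) (xCount : Int) (yCount : Int), Dom_generateContour coords xCount yCount → Pre_generateContour coords xCount yCount → Spec_generateContour coords xCount yCount (generateContour coords xCount yCount)

-- ===== LEMMAS AND PROOFS =====

theorem nodup_keys_pvToDict (coords : List (Int × Int × Int)) : (pvToDict coords).keys.Nodup := by
  exact PySem.Dict.nodup_keys_update _ _ (by simp [PySem.Dict.keys_empty])

theorem get?_pvToDict_isSome (coords : List (Int × Int × Int)) (a b : Int)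
    (h : ∃ e ∈ coords, e.1 = a ∧ e.2.1 = b) :
    ∃ v, (pvToDict coords).get? (a, b) = some v := by
  have hk : (a, b) ∈ (pvToDict coords).keys := by
    show (a, b) ∈ (List.foldl (fun acc p => acc.insert p.1 p.2) PySem.Dict.empty
      (List.map (fun e => ((e.1, e.2.1), e.2.2)) coords)).keys
    have hkeys : (List.foldl (fun acc p => acc.insert p.1 p.2) PySem.Dict.empty
        (List.map (fun e => ((e.1, e.2.1), e.2.2)) coords)).keys
        = PySem.Set.update (PySem.Dict.empty (κ := Int × Int) (ν := Int)).keys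
            (List.map Prod.fst (List.map (fun e => ((e.1, e.2.1), e.2.2)) coords)) :=
      PySem.Dict.keys_foldl_insert_key _ Prod.fst (fun _ p => p.2) _
    rw [hkeys, PySem.Dict.keys_empty]
    have hupd : PySem.Set.update ([] : List (Int × Int))
        (List.map Prod.fst (List.map (fun e => ((e.1, e.2.1), e.2.2)) coords))
        = PySem.Set.ofList (List.map Prod.fst (List.map (fun e => ((e.1, e.2.1), e.2.2)) coords)) := rfl
    rw [hupd, PySem.Set.mem_ofList]
    obtain ⟨e, he, h1, h2⟩ := h
    simp only [List.map_map, List.mem_map]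
    exact ⟨e, he, by simp [h1, h2]⟩
  have hc : (pvToDict coords).contains (a, b) = true :=
    (PySem.Dict.contains_iff_mem_keys _ _).mpr hk
  cases hg : (pvToDict coords).get? (a, b) with
  | none => exact absurd hc (by simp [(PySem.Dict.get?_eq_none_iff_contains _ _).mp hg])
  | some v => exact ⟨v, rfl⟩

set_option maxRecDepth 40000 in
set_option maxHeartbeats 2000000 in
theorem charMapA_get (b1 b2 b3 b4 b5 b6 : Bool) :
    charMapA.get? ((if b1 then ['.'] else [' ']) ++ (if b2 then ['.'] else [' ']) ++
      (if b3 then ['.'] else [' ']) ++ (if b4 then ['.'] else [' ']) ++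
      (if b5 then ['.'] else [' ']) ++ (if b6 then ['.'] else [' '])) =
    some [if ((if b1 then 1 else 0) + (if b3 then 2 else 0) + (if b5 then 4 else 0) +
             (if b2 then 8 else 0) + (if b4 then 16 else 0) + (if b6 then 32 else 0) : Nat) = 0
          then ' '
          else Char.ofNat (0x2800 + ((if b1 then 1 else 0) + (if b3 then 2 else 0) + (if b5 then 4 else 0) +
             (if b2 then 8 else 0) + (if b4 then 16 else 0) + (if b6 then 32 else 0)))] := by
  revert b1 b2 b3 b4 b5 b6
  decide

theorem pix_if (v : Int) : (if v > 0 then ([' '] : List Char) else ['.']) = (if decide (v ≤ 0) then ['.'] else [' ']) := by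
  by_cases h : v ≤ 0
  · simp [h, not_lt.mpr h]
  · simp [h, not_le.mp h]

-- the condition under which Source B's scatter pass adds item p's bit into cell q
def hitB (xCount yCount : Int) (p : (Int × Int) × Int) (q : Int × Int) : Bool :=
  decide (p.2 ≤ 0 ∧ (0 ≤ PySem.Int.floordiv p.1.1 2 ∧ PySem.Int.floordiv p.1.1 2 < xCount ∧
    0 ≤ PySem.Int.floordiv p.1.2 3 ∧ PySem.Int.floordiv p.1.2 3 < yCount) ∧
    (PySem.Int.floordiv p.1.1 2, PySem.Int.floordiv p.1.2 3) = q)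

def wB (k : Int × Int) : Int :=
  2 ^ ((k.2 - 3 * PySem.Int.floordiv k.2 3) + 3 * (k.1 - 2 * PySem.Int.floordiv k.1 2)).toNat

-- gather/scatter duality: what the scatter fold leaves at cell q is the sum of the bits of the
-- items hitting q
theorem getD_foldl_stepB (xCount yCount : Int) (l : List ((Int × Int) × Int))
    (c : PySem.Dict (Int × Int) Int) (q : Int × Int) :
    (l.foldl (stepB xCount yCount) c).getD q 0
      = c.getD q 0 + (l.map (fun p => if hitB xCount yCount p q then wB p.1 else 0)).sum := by
  induction l generalizing c with
  | nil => simp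
  | cons p t ih =>
    simp only [List.foldl_cons, List.map_cons, List.sum_cons, ih]
    by_cases h1 : p.2 ≤ 0
    · by_cases h2 : 0 ≤ PySem.Int.floordiv p.1.1 2 ∧ PySem.Int.floordiv p.1.1 2 < xCount ∧
          0 ≤ PySem.Int.floordiv p.1.2 3 ∧ PySem.Int.floordiv p.1.2 3 < yCount
      · by_cases h3 : (PySem.Int.floordiv p.1.1 2, PySem.Int.floordiv p.1.2 3) = q
        · have hs : stepB xCount yCount c p = c.insert q (c.getD q 0 + wB p.1) := by
            unfold stepB wB
            rw [if_pos h1, if_pos h2, h3]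
          rw [hs, PySem.Dict.getD_insert_self, if_pos (show hitB xCount yCount p q = true by simp only [hitB, decide_eq_true_eq]; exact ⟨h1, h2, h3⟩)]
          ring
        · have hs : stepB xCount yCount c p
              = c.insert (PySem.Int.floordiv p.1.1 2, PySem.Int.floordiv p.1.2 3)
                  (c.getD (PySem.Int.floordiv p.1.1 2, PySem.Int.floordiv p.1.2 3) 0 + wB p.1) := by
            unfold stepB wB
            rw [if_pos h1, if_pos h2]
          rw [hs, PySem.Dict.getD_insert_of_ne _ _ _ (fun he => h3 he.symm),
            if_neg (show ¬ hitB xCount yCount p q = true by simp only [hitB, decide_eq_true_eq]; exact fun hh => h3 hh.2.2)]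
          ring
      · have hs : stepB xCount yCount c p = c := by unfold stepB; rw [if_pos h1, if_neg h2]
        rw [hs, if_neg (show ¬ hitB xCount yCount p q = true by simp only [hitB, decide_eq_true_eq]; exact fun hh => h2 hh.2.1)]
        ring
    · have hs : stepB xCount yCount c p = c := by unfold stepB; rw [if_neg h1]
      rw [hs, if_neg (show ¬ hitB xCount yCount p q = true by simp only [hitB, decide_eq_true_eq]; exact fun hh => h1 hh.1)]
      ring

theorem sum_notkey (l : List ((Int × Int) × Int)) (k : Int × Int) (b : Int)
    (h : k ∉ l.map Prod.fst) :
    (l.map (fun p => if p.2 ≤ 0 ∧ p.1 = k then b else 0)).sum = 0 := by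
  induction l with
  | nil => simp
  | cons p t ih =>
    simp only [List.map_cons, List.mem_cons, not_or] at h ⊢
    rw [List.sum_cons, if_neg (fun hc => h.1 hc.2.symm), ih h.2, add_zero]

theorem sum_keyed (l : List ((Int × Int) × Int)) (hnd : (l.map Prod.fst).Nodup)
    (k : Int × Int) (v b : Int) (h : (k, v) ∈ l) :
    (l.map (fun p => if p.2 ≤ 0 ∧ p.1 = k then b else 0)).sum = if v ≤ 0 then b else 0 := by
  induction l with
  | nil => simp at h
  | cons p t ih =>
    simp only [List.map_cons, List.nodup_cons] at hnd
    rcases List.mem_cons.mp h with hh | ht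
    · rw [← hh]
      simp only [List.map_cons, List.sum_cons]
      rw [sum_notkey t k b (by rw [← hh] at hnd; exact hnd.1)]
      by_cases hv : v ≤ 0 <;> simp [hv]
    · have hpk : p.1 ≠ k := by
        intro he
        exact hnd.1 (he ▸ (List.mem_map.mpr ⟨(k, v), ht, rfl⟩))
      simp only [List.map_cons, List.sum_cons]
      rw [if_neg (fun hc => hpk hc.2), ih hnd.2 ht, zero_add]

-- the bit value of each of the six pixel positions of cell (j, i)
theorem wB_TL (j i : Int) : wB (j * 2, i * 3) = 1 := by
  unfold wB
  rw [PySem.Int.floordiv_eq_ediv_of_pos (by norm_num), PySem.Int.floordiv_eq_ediv_of_pos (by norm_num)]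
  rw [show ((i * 3 - 3 * (i * 3 / 3) + 3 * (j * 2 - 2 * (j * 2 / 2))) : Int) = 0 by omega]
  norm_num

theorem wB_TR (j i : Int) : wB (j * 2 + 1, i * 3) = 8 := by
  unfold wB
  rw [PySem.Int.floordiv_eq_ediv_of_pos (by norm_num), PySem.Int.floordiv_eq_ediv_of_pos (by norm_num)]
  rw [show ((i * 3 - 3 * (i * 3 / 3) + 3 * (j * 2 + 1 - 2 * ((j * 2 + 1) / 2))) : Int) = 3 by omega]
  decide

theorem wB_ML (j i : Int) : wB (j * 2, i * 3 + 1) = 2 := by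
  unfold wB
  rw [PySem.Int.floordiv_eq_ediv_of_pos (by norm_num), PySem.Int.floordiv_eq_ediv_of_pos (by norm_num)]
  rw [show ((i * 3 + 1 - 3 * ((i * 3 + 1) / 3) + 3 * (j * 2 - 2 * (j * 2 / 2))) : Int) = 1 by omega]
  norm_num

theorem wB_MR (j i : Int) : wB (j * 2 + 1, i * 3 + 1) = 16 := by
  unfold wB
  rw [PySem.Int.floordiv_eq_ediv_of_pos (by norm_num), PySem.Int.floordiv_eq_ediv_of_pos (by norm_num)]
  rw [show ((i * 3 + 1 - 3 * ((i * 3 + 1) / 3) + 3 * (j * 2 + 1 - 2 * ((j * 2 + 1) / 2))) : Int) = 4 by omega]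
  decide

theorem wB_BL (j i : Int) : wB (j * 2, i * 3 + 2) = 4 := by
  unfold wB
  rw [PySem.Int.floordiv_eq_ediv_of_pos (by norm_num), PySem.Int.floordiv_eq_ediv_of_pos (by norm_num)]
  rw [show ((i * 3 + 2 - 3 * ((i * 3 + 2) / 3) + 3 * (j * 2 - 2 * (j * 2 / 2))) : Int) = 2 by omega]
  decide

theorem wB_BR (j i : Int) : wB (j * 2 + 1, i * 3 + 2) = 32 := by
  unfold wB
  rw [PySem.Int.floordiv_eq_ediv_of_pos (by norm_num), PySem.Int.floordiv_eq_ediv_of_pos (by norm_num)]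
  rw [show ((i * 3 + 2 - 3 * ((i * 3 + 2) / 3) + 3 * (j * 2 + 1 - 2 * ((j * 2 + 1) / 2))) : Int) = 5 by omega]
  decide

-- pointwise split of one scatter contribution to cell (j, i) into the six pixel positions
theorem hit_split (xCount yCount j i : Int) (hj : 0 ≤ j ∧ j < xCount) (hi : 0 ≤ i ∧ i < yCount)
    (p : (Int × Int) × Int) :
    (if hitB xCount yCount p (j, i) then wB p.1 else 0)
      = (if p.2 ≤ 0 ∧ p.1 = (j * 2, i * 3) then 1 else 0)
        + ((if p.2 ≤ 0 ∧ p.1 = (j * 2 + 1, i * 3) then 8 else 0)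
        + ((if p.2 ≤ 0 ∧ p.1 = (j * 2, i * 3 + 1) then 2 else 0)
        + ((if p.2 ≤ 0 ∧ p.1 = (j * 2 + 1, i * 3 + 1) then 16 else 0)
        + ((if p.2 ≤ 0 ∧ p.1 = (j * 2, i * 3 + 2) then 4 else 0)
        + (if p.2 ≤ 0 ∧ p.1 = (j * 2 + 1, i * 3 + 2) then 32 else 0))))) := by
  obtain ⟨⟨x, y⟩, v⟩ := p
  simp only [hitB, decide_eq_true_eq, Prod.mk.injEq]
  rw [PySem.Int.floordiv_eq_ediv_of_pos (a := x) (by norm_num),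
      PySem.Int.floordiv_eq_ediv_of_pos (a := y) (by norm_num)]
  by_cases hv : v ≤ 0
  · simp only [hv, true_and]
    by_cases hc : x / 2 = j ∧ y / 3 = i
    · rw [if_pos ⟨by omega, hc⟩]
      have hx : x = j * 2 ∨ x = j * 2 + 1 := by omega
      have hy : y = i * 3 ∨ y = i * 3 + 1 ∨ y = i * 3 + 2 := by omega
      rcases hx with hx | hx <;> rcases hy with hy | hy | hy <;> subst hx <;> subst hy
      · rw [wB_TL]; split_ifs <;> omega
      · rw [wB_ML]; split_ifs <;> omega
      · rw [wB_BL]; split_ifs <;> omega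
      · rw [wB_TR]; split_ifs <;> omega
      · rw [wB_MR]; split_ifs <;> omega
      · rw [wB_BR]; split_ifs <;> omega
    · rw [if_neg (by rintro ⟨_, hc2⟩; exact hc hc2)]
      split_ifs <;> omega
  · simp only [hv, false_and, if_false]
    ring

-- value accumulated at cell (j, i) by the scatter pass, given the six pixel values of that cell
theorem cells_getD (coords : List (Int × Int × Int)) (xCount yCount j i : Int)
    (hj : 0 ≤ j ∧ j < xCount) (hi : 0 ≤ i ∧ i < yCount) (v1 v2 v3 v4 v5 v6 : Int)
    (e1 : (pvToDict coords).get? (j * 2, i * 3) = some v1)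
    (e2 : (pvToDict coords).get? (j * 2 + 1, i * 3) = some v2)
    (e3 : (pvToDict coords).get? (j * 2, i * 3 + 1) = some v3)
    (e4 : (pvToDict coords).get? (j * 2 + 1, i * 3 + 1) = some v4)
    (e5 : (pvToDict coords).get? (j * 2, i * 3 + 2) = some v5)
    (e6 : (pvToDict coords).get? (j * 2 + 1, i * 3 + 2) = some v6) :
    ((pvToDict coords).items.foldl (stepB xCount yCount) PySem.Dict.empty).getD (j, i) 0
      = (if v1 ≤ 0 then 1 else 0) + ((if v2 ≤ 0 then 8 else 0) + ((if v3 ≤ 0 then 2 else 0)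
        + ((if v4 ≤ 0 then 16 else 0) + ((if v5 ≤ 0 then 4 else 0)
        + (if v6 ≤ 0 then 32 else 0))))) := by
  have hnd : ((pvToDict coords).items.map Prod.fst).Nodup := nodup_keys_pvToDict coords
  rw [getD_foldl_stepB, PySem.Dict.getD_empty,
    List.map_congr_left (fun p _ => hit_split xCount yCount j i hj hi p),
    PySem.List.sum_map_add_int, PySem.List.sum_map_add_int, PySem.List.sum_map_add_int,
    PySem.List.sum_map_add_int, PySem.List.sum_map_add_int,
    sum_keyed _ hnd _ v1 1 (PySem.Dict.mem_items_of_get?_eq_some _ e1),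
    sum_keyed _ hnd _ v2 8 (PySem.Dict.mem_items_of_get?_eq_some _ e2),
    sum_keyed _ hnd _ v3 2 (PySem.Dict.mem_items_of_get?_eq_some _ e3),
    sum_keyed _ hnd _ v4 16 (PySem.Dict.mem_items_of_get?_eq_some _ e4),
    sum_keyed _ hnd _ v5 4 (PySem.Dict.mem_items_of_get?_eq_some _ e5),
    sum_keyed _ hnd _ v6 32 (PySem.Dict.mem_items_of_get?_eq_some _ e6),
    zero_add]

set_option maxRecDepth 40000 in
set_option maxHeartbeats 4000000 in
-- A's table-lookup character equals B's arithmetic character, given the six pixel values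
theorem cell_eq (v1 v2 v3 v4 v5 v6 : Int) :
    (matchCharA [some v1, some v2, some v3, some v4, some v5, some v6]).getD []
      = [if ((if v1 ≤ 0 then 1 else 0) + ((if v2 ≤ 0 then 8 else 0) + ((if v3 ≤ 0 then 2 else 0)
          + ((if v4 ≤ 0 then 16 else 0) + ((if v5 ≤ 0 then 4 else 0)
          + (if v6 ≤ 0 then 32 else 0))))) : Int) = 0 then ' '
         else Char.ofNat (((0x2800 : Int) + ((if v1 ≤ 0 then 1 else 0) + ((if v2 ≤ 0 then 8 else 0)
          + ((if v3 ≤ 0 then 2 else 0) + ((if v4 ≤ 0 then 16 else 0) + ((if v5 ≤ 0 then 4 else 0)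
          + (if v6 ≤ 0 then 32 else 0))))))).toNat)] := by
  simp only [matchCharA, List.foldl, Option.bind, Option.map, List.nil_append]
  rw [pix_if v1, pix_if v2, pix_if v3, pix_if v4, pix_if v5, pix_if v6,
    charMapA_get (decide (v1 ≤ 0)) (decide (v2 ≤ 0)) (decide (v3 ≤ 0)) (decide (v4 ≤ 0))
      (decide (v5 ≤ 0)) (decide (v6 ≤ 0))]
  simp only [Option.getD_some]
  by_cases h1 : v1 ≤ 0 <;> by_cases h2 : v2 ≤ 0 <;> by_cases h3 : v3 ≤ 0 <;>
    by_cases h4 : v4 ≤ 0 <;> by_cases h5 : v5 ≤ 0 <;> by_cases h6 : v6 ≤ 0 <;>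
    simp only [h1, h2, h3, h4, h5, h6, decide_true, decide_false, if_true, if_false] <;> decide

-- ===== VERDICT =====
theorem generateContour_spec : Claim_equal_generateContour := by
  intro coords xCount yCount hdom hpre
  unfold Spec_generateContour generateContour generateContour_alt
  simp only []
  rw [PySem.List.foldl_append_singleton_eq_map
    (fun i => String.ofList (((PySem.List.pyRange 0 xCount 1).foldl (fun line j =>
      line ++ (matchCharA [(pvToDict coords).get? (j * 2, i * 3), (pvToDict coords).get? (j * 2 + 1, i * 3),
        (pvToDict coords).get? (j * 2, i * 3 + 1), (pvToDict coords).get? (j * 2 + 1, i * 3 + 1),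
        (pvToDict coords).get? (j * 2, i * 3 + 2), (pvToDict coords).get? (j * 2 + 1, i * 3 + 2)]).getD [])
      ([] : List Char)) ++ ['\n']))]
  rw [List.nil_append]
  apply List.map_congr_left
  intro i hi
  congr 1
  have hipos : 0 ≤ i ∧ i < yCount := by
    have := (PySem.List.mem_pyRange_one).mp hi
    omega
  by_cases hpos : 0 < xCount ∧ 0 < yCount
  · unfold Pre_generateContour preCellsB at hpre
    rw [if_pos hpos] at hpre
    split_ifs at hpre with hlen
    have hall : ∀ i ∈ PySem.List.pyRange 0 yCount 1, ∀ j ∈ PySem.List.pyRange 0 xCount 1,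
        ∀ k ∈ ([(j * 2, i * 3), (j * 2 + 1, i * 3), (j * 2, i * 3 + 1), (j * 2 + 1, i * 3 + 1),
                (j * 2, i * 3 + 2), (j * 2 + 1, i * 3 + 2)] : List (Int × Int)),
          ∃ e ∈ coords, e.1 = k.1 ∧ e.2.1 = k.2 := by
      intro i hi j hj k hk
      simp only [List.all_eq_true] at hpre
      have := hpre i hi j hj k hk
      simpa using this
    have hinner : ∀ j ∈ PySem.List.pyRange 0 xCount 1, ∀ line : List Char,
        line ++ (matchCharA [(pvToDict coords).get? (j * 2, i * 3), (pvToDict coords).get? (j * 2 + 1, i * 3),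
          (pvToDict coords).get? (j * 2, i * 3 + 1), (pvToDict coords).get? (j * 2 + 1, i * 3 + 1),
          (pvToDict coords).get? (j * 2, i * 3 + 2), (pvToDict coords).get? (j * 2 + 1, i * 3 + 2)]).getD []
        = line ++ [if ((pvToDict coords).items.foldl (stepB xCount yCount) PySem.Dict.empty).getD (j, i) 0 = 0
                   then ' '
                   else Char.ofNat (0x2800 + ((pvToDict coords).items.foldl (stepB xCount yCount) PySem.Dict.empty).getD (j, i) 0).toNat] := by
      intro j hj line
      have hjpos : 0 ≤ j ∧ j < xCount := by
        have := (PySem.List.mem_pyRange_one).mp hj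
        omega
      obtain ⟨v1, e1⟩ := get?_pvToDict_isSome coords (j * 2) (i * 3) (hall i hi j hj (j * 2, i * 3) (by simp))
      obtain ⟨v2, e2⟩ := get?_pvToDict_isSome coords (j * 2 + 1) (i * 3) (hall i hi j hj (j * 2 + 1, i * 3) (by simp))
      obtain ⟨v3, e3⟩ := get?_pvToDict_isSome coords (j * 2) (i * 3 + 1) (hall i hi j hj (j * 2, i * 3 + 1) (by simp))
      obtain ⟨v4, e4⟩ := get?_pvToDict_isSome coords (j * 2 + 1) (i * 3 + 1) (hall i hi j hj (j * 2 + 1, i * 3 + 1) (by simp))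
      obtain ⟨v5, e5⟩ := get?_pvToDict_isSome coords (j * 2) (i * 3 + 2) (hall i hi j hj (j * 2, i * 3 + 2) (by simp))
      obtain ⟨v6, e6⟩ := get?_pvToDict_isSome coords (j * 2 + 1) (i * 3 + 2) (hall i hi j hj (j * 2 + 1, i * 3 + 2) (by simp))
      rw [e1, e2, e3, e4, e5, e6, cell_eq v1 v2 v3 v4 v5 v6,
        ← cells_getD coords xCount yCount j i hjpos hipos v1 v2 v3 v4 v5 v6 e1 e2 e3 e4 e5 e6]
    rw [PySem.List.foldl_congr_mem _ _
        (fun line j => line ++ [if ((pvToDict coords).items.foldl (stepB xCount yCount) PySem.Dict.empty).getD (j, i) 0 = 0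
                   then ' '
                   else Char.ofNat (0x2800 + ((pvToDict coords).items.foldl (stepB xCount yCount) PySem.Dict.empty).getD (j, i) 0).toNat]) []
        (fun acc x hx => hinner x hx acc),
      PySem.List.foldl_append_singleton_eq_map, List.nil_append]
  · have hx : xCount ≤ 0 := by
      by_contra h
      exact hpos ⟨by omega, by omega⟩
    rw [PySem.List.pyRange_one_eq_nil (by omega)]
    simp [List.foldl]
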